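-- pv_equiv track=rewrite | github.com/wxz667/law-kg | src/interprets_filter/dataset.py | desired_source_category_counts
-- ===== SOURCE A (Python) =====
-- from collections import Counter, defaultdict
-- from typing import Any
--
-- SOURCE_CATEGORY_ORDER = ("constitution", "law", "regulation", "interpretation")
--
-- def desired_source_category_counts(target_total: int, rows: list[dict[str, Any]]) -> dict[str, int]:
--     available = Counter(str(row.get("source_category", "")) for row in rows)
--     categories = [category for category in SOURCE_CATEGORY_ORDER if available.get(category, 0) > 0]
--     if not categories or target_total <= 0:
--         return {}
--     base = target_total // len(categories)
--     counts = {category: min(available.get(category, 0), base) for category in categories}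
--     assigned = sum(counts.values())
--     remaining = max(target_total - assigned, 0)
--     while remaining > 0:
--         best_category = max(
--             categories,
--             key=lambda category: (available.get(category, 0) - counts.get(category, 0), -SOURCE_CATEGORY_ORDER.index(category)),
--         )
--         if available.get(best_category, 0) <= counts.get(best_category, 0):
--             break
--         counts[best_category] = counts.get(best_category, 0) + 1
--         remaining -= 1
--     return counts
-- ===== SOURCE B (Python) =====
-- SOURCE_CATEGORY_ORDER = ("constitution", "law", "regulation", "interpretation")
--
-- def _water(head, remaining):
--     """Final headroom vector after removing `remaining` units, always taking from
--     a current maximum entry (ties: lowest index), done level-by-level in bulk."""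
--     m = max(head)
--     if remaining <= 0 or m <= 0:
--         return list(head)
--     k = head.count(m)
--     m2 = max((h for h in head if h < m), default=0)
--     chunk = k * (m - m2)
--     if remaining >= chunk:
--         return _water([min(h, m2) for h in head], remaining - chunk)
--     q, t = divmod(remaining, k)
--     out = []
--     seen = 0
--     for h in head:
--         if h == m:
--             out.append(m - q - (1 if seen < t else 0))
--             seen += 1
--         else:
--             out.append(h)
--     return out
--
-- def desired_source_category_counts(target_total, rows):
--     avail = {}
--     for row in rows:
--         c = str(row.get("source_category", ""))
--         avail[c] = avail.get(c, 0) + 1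
--     cats = [c for c in SOURCE_CATEGORY_ORDER if avail.get(c, 0) > 0]
--     if not cats or target_total <= 0:
--         return {}
--     base = target_total // len(cats)
--     counts = [min(avail[c], base) for c in cats]
--     head = [avail[c] - n for c, n in zip(cats, counts)]
--     final_head = _water(head, target_total - sum(counts))
--     return {c: avail[c] - h for c, h in zip(cats, final_head)}
-- ===== Notes on version B (the rewrite author's own statement) =====
-- stated objective: alternative
-- what changed: A distributes the remainder one unit per while-loop iteration (each picking the max-headroom category); B computes the same allocation by bulk water-filling: it lowers the whole top headroom level to the next level in one arithmetic chunk and splits the final partial level with divmod, so the distribution phase is a short recursion over the distinct headroom levels (at most 4) instead of one iteration per remaining unit.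
import Mathlib
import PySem

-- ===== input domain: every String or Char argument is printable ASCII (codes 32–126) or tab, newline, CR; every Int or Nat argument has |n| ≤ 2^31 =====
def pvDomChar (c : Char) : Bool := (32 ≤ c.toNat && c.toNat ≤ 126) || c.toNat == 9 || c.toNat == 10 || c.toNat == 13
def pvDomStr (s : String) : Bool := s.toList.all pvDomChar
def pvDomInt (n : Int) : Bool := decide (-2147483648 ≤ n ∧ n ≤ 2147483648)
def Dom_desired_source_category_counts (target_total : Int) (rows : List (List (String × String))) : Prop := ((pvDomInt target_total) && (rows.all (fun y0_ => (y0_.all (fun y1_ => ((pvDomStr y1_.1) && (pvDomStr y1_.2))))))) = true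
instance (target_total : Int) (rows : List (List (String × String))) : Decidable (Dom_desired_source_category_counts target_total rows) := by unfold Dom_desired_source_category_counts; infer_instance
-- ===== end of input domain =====

-- B replaces A's one-unit-per-iteration while-loop over the remainder by a bulk
-- level-by-level water-filling recursion (one arithmetic chunk per headroom level).

-- ===== PORT A =====
def pvOrder : List String := ["constitution", "law", "regulation", "interpretation"]

-- the `while remaining > 0` loop of A (state: counts dict, remaining)
def pvLoopA (available : PySem.Dict String Int) (categories : List String)
    (counts : PySem.Dict String Int) (remaining : Int) : PySem.Dict String Int :=
  if 0 < remaining then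
    match PySem.List.max2? categories
        (fun c => available.getD c 0 - counts.getD c 0)
        (fun c => -(((PySem.List.index? pvOrder c).getD 0 : Nat) : Int)) with
    | none => counts     -- Python's max([]) raises; unreachable (pvLoopA is only called with categories ≠ [])
    | some best =>
        if available.getD best 0 ≤ counts.getD best 0 then counts
        else pvLoopA available categories (counts.insert best (counts.getD best 0 + 1)) (remaining - 1)
  else counts
termination_by remaining.toNat
decreasing_by simp at *; omega

def desired_source_category_counts (target_total : Int) (rows : List (List (String × String))) : List (String × Int) :=
  -- available = Counter(str(row.get("source_category", "")) for row in rows); str() is identity on str values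
  let available := PySem.Dict.counter (rows.map (fun row => PySem.Dict.getD ⟨row⟩ "source_category" ""))
  let categories := pvOrder.filter (fun c => 0 < available.getD c 0)
  if categories = [] ∨ target_total ≤ 0 then []
  else
    let base := PySem.Int.floordiv target_total (categories.length : Int)
    let counts := categories.foldl (fun d c => d.insert c (min (available.getD c 0) base)) PySem.Dict.empty
    let assigned := counts.values.sum
    let remaining := max (target_total - assigned) 0
    (pvLoopA available categories counts remaining).items

-- ===== PORT B =====
-- general bound used by pvWater's termination argument (cited by decreasing_by)
theorem pv_foldl_max_le (t : List Int) (a m : Int) (ha : a ≤ m) (h : ∀ x ∈ t, x ≤ m) :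
    t.foldl max a ≤ m := by
  induction t generalizing a with
  | nil => simpa using ha
  | cons y u ih =>
      simp only [List.foldl_cons]
      exact ih (max a y) (max_le ha (h y (by simp))) (fun x hx => h x (by simp [hx]))

-- _water(head, remaining) of B
def pvWater (head : List Int) (remaining : Int) : List Int :=
  match hm : PySem.List.max? head (fun x => x) with
  | none => head       -- Python max([]) raises; unreachable (B only calls _water on nonempty head)
  | some m =>
    if remaining ≤ 0 ∨ m ≤ 0 then head
    else
      let k : Int := (PySem.List.count head m : Int)
      let m2 := PySem.List.maxD (head.filter (fun h => h < m)) (fun x => x) 0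
      let chunk := k * (m - m2)
      if chunk ≤ remaining then pvWater (head.map (fun h => min h m2)) (remaining - chunk)
      else
        let q := PySem.Int.floordiv remaining k
        let t := PySem.Int.mod remaining k
        (head.foldl (fun (acc : List Int × Int) h =>
            if h = m then (acc.1 ++ [m - q - (if acc.2 < t then 1 else 0)], acc.2 + 1)
            else (acc.1 ++ [h], acc.2)) ([], 0)).1
termination_by (head.foldl max 0).toNat
decreasing_by
  simp
  rename_i hguard _
  have hmem : m ∈ head := PySem.List.max?_mem hm
  have h1 : m ≤ head.foldl max 0 := (PySem.List.le_foldl_max head 0).2 m hmem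
  have hmpos : 0 < m := by omega
  have key : ∀ w : Int, w < m → List.foldl max 0 (head.map (fun x => min x w)) < List.foldl max 0 head := by
    intro w hw
    have : List.foldl max 0 (head.map (fun x => min x w)) ≤ max 0 w := by
      apply pv_foldl_max_le
      · exact le_max_left _ _
      · intro x hx
        simp only [List.mem_map] at hx
        obtain ⟨y, _, rfl⟩ := hx
        exact le_trans (min_le_right _ _) (le_max_right _ _)
    omega
  refine ⟨key _ ?_, by omega⟩
  have hm2lt : ∀ L : List Int, (∀ x ∈ L, x < m) → PySem.List.maxD L (fun x => x) 0 < m := by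
    intro L hL
    unfold PySem.List.maxD
    cases hmx : PySem.List.max? L (fun x => x) with
    | none => simpa using hmpos
    | some w => simpa using hL w (PySem.List.max?_mem hmx)
  apply hm2lt
  intro x hx
  simp only [List.mem_unattach, List.mem_filter, decide_eq_true_eq] at hx
  obtain ⟨hh, _, hlt⟩ := hx
  exact hlt

def desired_source_category_counts_alt (target_total : Int) (rows : List (List (String × String))) : List (String × Int) :=
  let avail := rows.foldl (fun d row =>
      let c := PySem.Dict.getD (⟨row⟩ : PySem.Dict String String) "source_category" ""
      d.insert c (d.getD c 0 + 1)) PySem.Dict.empty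
  let cats := pvOrder.filter (fun c => 0 < avail.getD c 0)
  if cats = [] ∨ target_total ≤ 0 then []
  else
    let base := PySem.Int.floordiv target_total (cats.length : Int)
    let counts := cats.map (fun c => min (avail.getD c 0) base)
    let head := (cats.zip counts).map (fun p => avail.getD p.1 0 - p.2)
    let finalHead := pvWater head (target_total - counts.sum)
    ((cats.zip finalHead).foldl (fun d p => d.insert p.1 (avail.getD p.1 0 - p.2)) PySem.Dict.empty).items

-- ===== PRECONDITION & SPEC =====
def Spec_desired_source_category_counts (target_total : Int) (rows : List (List (String × String))) (out : List (String × Int)) : Prop := out = desired_source_category_counts_alt target_total rows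
instance (target_total : Int) (rows : List (List (String × String))) (out : List (String × Int)) : Decidable (Spec_desired_source_category_counts target_total rows out) := by unfold Spec_desired_source_category_counts; infer_instance

-- ===== CLAIM (what is proved, stated in full; the proofs are below) =====
def Claim_equal_desired_source_category_counts : Prop := ∀ (target_total : Int) (rows : List (List (String × String))), Dom_desired_source_category_counts target_total rows → Spec_desired_source_category_counts target_total rows (desired_source_category_counts target_total rows)

-- ===== LEMMAS AND PROOFS =====

-- pointwise difference (headroom vector)
def pvSub (a v : List Int) : List Int := List.zipWith (fun x y => x - y) a v

-- first argmax (index and value) of a list of ints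
def pvFam : List Int → Option (Nat × Int)
  | [] => none
  | x :: xs => match pvFam xs with
    | none => some (0, x)
    | some (i, v) => if x < v then some (i + 1, v) else some (0, x)

-- abstract form of A's loop: repeatedly decrement the first maximum entry
def pvDecLoop (g : List Int) (r : Int) : List Int :=
  if 0 < r then
    match pvFam g with
    | none => g
    | some (i, v) => if v ≤ 0 then g else pvDecLoop (g.set i (v - 1)) (r - 1)
  else g
termination_by r.toNat
decreasing_by simp at *; omega

-- number of occurrences of m strictly before position j
def pvRank (g : List Int) (m : Int) (j : Nat) : Nat := (g.take j).countP (fun x => x == m)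

-- state of the distribution: entries equal to m become m - q (minus one more for
-- the first (t - s) of them), everything else is untouched
def pvAssign (g : List Int) (m q t s : Int) : List Int :=
  match g with
  | [] => []
  | h :: gs => if h = m then (m - q - (if s < t then 1 else 0)) :: pvAssign gs m q t (s + 1)
               else h :: pvAssign gs m q t s

theorem pv_length_assign (g : List Int) (m q t s : Int) : (pvAssign g m q t s).length = g.length := by
  induction g generalizing s with
  | nil => rfl
  | cons h gs ih => unfold pvAssign; split <;> simp [ih]

theorem pv_rank_zero (g : List Int) (m : Int) : pvRank g m 0 = 0 := by simp [pvRank]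

theorem pv_rank_cons_succ (h : Int) (gs : List Int) (m : Int) (j : Nat) :
    pvRank (h :: gs) m (j + 1) = pvRank gs m j + (if h = m then 1 else 0) := by
  unfold pvRank
  rw [List.take_succ_cons, List.countP_cons]
  simp [beq_iff_eq]

theorem pv_getD_assign (g : List Int) (m q t s : Int) (j : Nat) (hj : j < g.length) :
    (pvAssign g m q t s).getD j 0 =
      if g.getD j 0 = m then m - q - (if s + (pvRank g m j : Int) < t then 1 else 0)
      else g.getD j 0 := by
  induction g generalizing j s with
  | nil => simp at hj
  | cons h gs ih =>
      unfold pvAssign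
      cases j with
      | zero => split <;> simp_all [pv_rank_zero]
      | succ j =>
          simp only [List.length_cons, Nat.add_lt_add_iff_right] at hj
          by_cases hm : h = m
          · rw [if_pos hm]
            simp only [List.getD_cons_succ, pv_rank_cons_succ, if_pos hm]
            rw [ih (s + 1) j hj]
            clear ih
            split_ifs <;> push_cast at * <;> omega
          · rw [if_neg hm]
            simp only [List.getD_cons_succ, pv_rank_cons_succ, if_neg hm]
            rw [ih s j hj]
            clear ih
            split_ifs <;> push_cast at * <;> omega

theorem pv_assign_id (g : List Int) (m : Int) (s : Int) (hs : 0 ≤ s) : pvAssign g m 0 0 s = g := by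
  induction g generalizing s with
  | nil => rfl
  | cons h gs ih =>
      unfold pvAssign
      split
      · rename_i hm
        rw [if_neg (by omega), ih (s + 1) (by omega)]
        simp [hm]
      · rw [ih s hs]

theorem pv_assign_cap (g : List Int) (m m2 : Int) (s : Int) (hs : 0 ≤ s)
    (hm2 : ∀ x ∈ g, x = m ∨ x ≤ m2) (hle : m2 ≤ m) :
    pvAssign g m (m - m2) 0 s = g.map (fun h => min h m2) := by
  induction g generalizing s with
  | nil => rfl
  | cons h gs ih =>
      unfold pvAssign
      have hrec : ∀ s', 0 ≤ s' → pvAssign gs m (m - m2) 0 s' = gs.map (fun h => min h m2) :=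
        fun s' hs' => ih s' hs' (fun x hx => hm2 x (by simp [hx]))
      split
      · rename_i hm
        rw [if_neg (by omega), hrec (s + 1) (by omega)]
        simp [hm, min_eq_right hle]
      · rename_i hm
        rw [hrec s hs]
        have := hm2 h (by simp)
        simp [min_eq_left (by omega : h ≤ m2)]

theorem pv_rank_succ (g : List Int) (m : Int) (j : Nat) (hj : j < g.length) :
    pvRank g m (j + 1) = pvRank g m j + (if g.getD j 0 = m then 1 else 0) := by
  unfold pvRank
  rw [List.take_add_one, List.countP_append, List.getElem?_eq_getElem hj]
  rw [List.getD_eq_getElem g 0 hj]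
  simp [beq_iff_eq]

theorem pv_rank_mono (g : List Int) (m : Int) {j j' : Nat} (h : j ≤ j') :
    pvRank g m j ≤ pvRank g m j' := by
  unfold pvRank
  exact (List.take_sublist_take_left h).countP_le

theorem pv_rank_lt_count (g : List Int) (m : Int) (j : Nat) (hj : j < g.length)
    (hm : g.getD j 0 = m) : pvRank g m j < g.countP (fun x => x == m) := by
  have h1 : pvRank g m (j + 1) = pvRank g m j + 1 := by
    rw [pv_rank_succ g m j hj, hm]; simp
  have h2 : pvRank g m (j + 1) ≤ pvRank g m g.length := pv_rank_mono g m (by omega)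
  have h3 : pvRank g m g.length = g.countP (fun x => x == m) := by
    unfold pvRank; rw [List.take_length]
  omega

theorem pv_rank_strict (g : List Int) (m : Int) {j j' : Nat} (h : j < j') (hj : j < g.length)
    (hm : g.getD j 0 = m) : pvRank g m j < pvRank g m j' := by
  have h1 : pvRank g m (j + 1) = pvRank g m j + 1 := by
    rw [pv_rank_succ g m j hj, hm]; simp
  have h2 : pvRank g m (j + 1) ≤ pvRank g m j' := pv_rank_mono g m (by omega)
  omega

theorem pv_exists_rank (g : List Int) (m : Int) (t : Nat) (ht : t < g.countP (fun x => x == m)) :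
    ∃ j, j < g.length ∧ g.getD j 0 = m ∧ pvRank g m j = t := by
  induction g generalizing t with
  | nil => simp at ht
  | cons h gs ih =>
      by_cases hm : h = m
      · cases t with
        | zero => exact ⟨0, by simp [hm, pv_rank_zero]⟩
        | succ t' =>
            have ht' : t' < gs.countP (fun x => x == m) := by
              rw [List.countP_cons] at ht
              simp [hm] at ht
              omega
            obtain ⟨j', hj1, hj2, hj3⟩ := ih t' ht'
            exact ⟨j' + 1, by simp [hj1], by simpa using hj2,
              by rw [pv_rank_cons_succ, hj3, if_pos hm]⟩
      · have ht' : t < gs.countP (fun x => x == m) := by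
          rw [List.countP_cons] at ht
          simp [hm] at ht
          omega
        obtain ⟨j', hj1, hj2, hj3⟩ := ih t ht'
        exact ⟨j' + 1, by simp [hj1], by simpa using hj2,
          by rw [pv_rank_cons_succ, hj3, if_neg hm]; omega⟩

theorem pv_fam_none (g : List Int) : pvFam g = none ↔ g = [] := by
  cases g with
  | nil => simp [pvFam]
  | cons x xs =>
      simp only [List.cons_ne_nil, iff_false]
      unfold pvFam
      cases pvFam xs with
      | none => simp
      | some p => obtain ⟨a, b⟩ := p; simp only; split <;> simp

theorem pv_fam_spec (g : List Int) (i : Nat) (v : Int) (h : pvFam g = some (i, v)) :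
    i < g.length ∧ v = g.getD i 0 ∧ (∀ j, j < g.length → g.getD j 0 ≤ v) ∧
      (∀ j, j < i → g.getD j 0 < v) := by
  induction g generalizing i v with
  | nil => simp [pvFam] at h
  | cons x xs ih =>
      unfold pvFam at h
      cases hf : pvFam xs with
      | none =>
          rw [hf] at h
          dsimp only at h
          simp only [Option.some.injEq, Prod.mk.injEq] at h
          obtain ⟨rfl, rfl⟩ := h
          have hnil : xs = [] := (pv_fam_none xs).mp hf
          subst hnil
          refine ⟨by simp, by simp, ?_, by omega⟩
          intro j hj
          have : j = 0 := by simpa using hj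
          subst this
          simp
      | some p =>
          obtain ⟨i', v'⟩ := p
          rw [hf] at h
          dsimp only at h
          obtain ⟨hlen', hval', hmax', hfirst'⟩ := ih i' v' hf
          by_cases hlt : x < v'
          · rw [if_pos hlt] at h
            simp only [Option.some.injEq, Prod.mk.injEq] at h
            obtain ⟨rfl, rfl⟩ := h
            refine ⟨by simpa using hlen', by simpa using hval', ?_, ?_⟩
            · intro j hj
              cases j with
              | zero => simpa using le_of_lt hlt
              | succ j => exact hmax' j (by simpa using hj)
            · intro j hj
              cases j with
              | zero => simpa using hlt
              | succ j => exact hfirst' j (by omega)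
          · rw [if_neg hlt] at h
            simp only [Option.some.injEq, Prod.mk.injEq] at h
            obtain ⟨rfl, rfl⟩ := h
            refine ⟨by simp, by simp, ?_, by omega⟩
            intro j hj
            cases j with
            | zero => simp
            | succ j =>
                have := hmax' j (by simpa using hj)
                simp only [List.getD_cons_succ]
                omega

theorem pv_fam_eq_of (g : List Int) (i : Nat) (hi : i < g.length)
    (hmax : ∀ j, j < g.length → g.getD j 0 ≤ g.getD i 0)
    (hfirst : ∀ j, j < i → g.getD j 0 < g.getD i 0) :
    pvFam g = some (i, g.getD i 0) := by
  induction g generalizing i with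
  | nil => simp at hi
  | cons x xs ih =>
      unfold pvFam
      cases i with
      | zero =>
          cases hf : pvFam xs with
          | none => simp
          | some p =>
              obtain ⟨i', v'⟩ := p
              obtain ⟨hlen', hval', _, _⟩ := pv_fam_spec xs i' v' hf
              have : v' ≤ x := by
                have := hmax (i' + 1) (by simpa using hlen')
                simpa [hval'] using this
              dsimp only
              simp only [List.getD_cons_zero]
              rw [if_neg (by omega)]
      | succ i =>
          have hi' : i < xs.length := by simpa using hi
          have heq : pvFam xs = some (i, xs.getD i 0) := by
            apply ih i hi'
            · intro j hj
              have := hmax (j + 1) (by simpa using hj)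
              simpa using this
            · intro j hj
              have := hfirst (j + 1) (by omega)
              simpa using this
          rw [heq]
          dsimp only
          have hx : x < xs.getD i 0 := by simpa using hfirst 0 (by omega)
          rw [if_pos hx]
          simp

theorem pv_max_keep {α : Type} (key : α → Int) (t : List α) (m : α)
    (h : ∀ y ∈ t, key y ≤ key m) :
    t.foldl (fun acc x => match acc with
      | none => some x
      | some mm => if key mm < key x then some x else some mm) (some m) = some m := by
  induction t generalizing m with
  | nil => rfl
  | cons y u ih =>
      simp only [List.foldl_cons]
      have hy : ¬ key m < key y := not_lt.mpr (h y (by simp))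
      rw [if_neg hy]
      exact ih m fun z hz => h z (by simp [hz])

theorem pv_max_through {α : Type} (key : α → Int) (t : List α) (m : α) (i : Nat)
    (hi : i < t.length)
    (hmax : ∀ j, (hj : j < t.length) → key t[j] ≤ key t[i])
    (hfirst : ∀ j, (hj : j < i) → key t[j] < key t[i])
    (hm : key m < key t[i]) :
    t.foldl (fun acc x => match acc with
      | none => some x
      | some mm => if key mm < key x then some x else some mm) (some m) = some t[i] := by
  induction t generalizing m i with
  | nil => simp at hi
  | cons y u ih =>
      simp only [List.foldl_cons]
      cases i with
      | zero =>
          simp only [List.getElem_cons_zero] at hm ⊢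
          rw [if_pos hm]
          apply pv_max_keep
          intro z hz
          obtain ⟨j, hj, rfl⟩ := List.mem_iff_getElem.mp hz
          have := hmax (j + 1) (by simpa using hj)
          simpa using this
      | succ i =>
          have hi' : i < u.length := by simpa using hi
          have hyi : key y < key u[i] := by simpa using hfirst 0 (by omega)
          rw [show (if key m < key y then some y else some m)
              = some (if key m < key y then y else m) by split <;> simp]
          simp only [List.getElem_cons_succ] at hm ⊢
          apply ih _ i hi'
          · intro j hj
            have := hmax (j + 1) (by simpa using hj)
            simpa using this
          · intro j hj
            have := hfirst (j + 1) (by omega)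
            simpa using this
          · split <;> [exact hyi; exact hm]

-- max? returns the first element attaining the maximal key
theorem pv_max?_eq_of {α : Type} (cats : List α) (k1 : α → Int) (i : Nat) (d : α)
    (hi : i < cats.length)
    (hmax : ∀ j, j < cats.length → k1 (cats.getD j d) ≤ k1 (cats.getD i d))
    (hfirst : ∀ j, j < i → k1 (cats.getD j d) < k1 (cats.getD i d)) :
    PySem.List.max? cats k1 = some (cats.getD i d) := by
  cases cats with
  | nil => simp at hi
  | cons c cs =>
      unfold PySem.List.max?
      simp only [List.foldl_cons]
      cases i with
      | zero =>
          simp only [List.getD_cons_zero]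
          apply pv_max_keep
          intro z hz
          obtain ⟨j, hj, rfl⟩ := List.mem_iff_getElem.mp hz
          have := hmax (j + 1) (by simpa using hj)
          rw [List.getD_cons_succ, List.getD_eq_getElem _ _ hj, List.getD_cons_zero] at this
          exact this
      | succ i =>
          have hi' : i < cs.length := by simpa using hi
          rw [List.getD_eq_getElem _ _ hi, List.getElem_cons_succ]
          apply pv_max_through
          · intro j hj
            have := hmax (j + 1) (by simpa using hj)
            rw [List.getD_eq_getElem _ _ (by simpa using hj : j + 1 < (c :: cs).length),
              List.getD_eq_getElem _ _ hi] at this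
            simpa using this
          · intro j hj
            have := hfirst (j + 1) (by omega)
            rw [List.getD_eq_getElem _ _ (by omega : j + 1 < (c :: cs).length),
              List.getD_eq_getElem _ _ hi] at this
            simpa using this
          · have := hfirst 0 (by omega)
            rw [List.getD_eq_getElem _ _ (by omega : 0 < (c :: cs).length),
              List.getD_eq_getElem _ _ hi] at this
            simpa using this

theorem pv_max2_through {α : Type} (k1 k2 : α → Int) (t : List α) (m : α)
    (h : ∀ y ∈ t, k2 y < k2 m) (hpw : t.Pairwise (fun a b => k2 b < k2 a)) :
    t.foldl (fun acc x => match acc with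
      | none => some x
      | some mm => if (decide (k1 mm < k1 x) || !decide (k1 x < k1 mm) && decide (k2 mm < k2 x)) = true
                   then some x else some mm) (some m)
      = t.foldl (fun acc x => match acc with
      | none => some x
      | some mm => if k1 mm < k1 x then some x else some mm) (some m) := by
  induction t generalizing m with
  | nil => rfl
  | cons y u ih =>
      simp only [List.foldl_cons]
      have h2 : ¬ (k2 m < k2 y) := by
        have := h y (by simp)
        omega
      have hcond : (decide (k1 m < k1 y) || !decide (k1 y < k1 m) && decide (k2 m < k2 y))
          = decide (k1 m < k1 y) := by
        simp [h2]
      rw [hcond]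
      obtain ⟨hy, hpw'⟩ := List.pairwise_cons.mp hpw
      by_cases hk : k1 m < k1 y
      · simp only [hk, decide_true, if_pos]
        exact ih y hy hpw'
      · simp only [hk, decide_false]
        rw [if_neg (by simp)]
        exact ih m (fun z hz => h z (by simp [hz])) hpw'

-- with a strictly decreasing secondary key the tuple max degenerates to max?
theorem pv_max2_eq_max? {α : Type} (cats : List α) (k1 k2 : α → Int)
    (hpw : cats.Pairwise (fun a b => k2 b < k2 a)) :
    PySem.List.max2? cats k1 k2 = PySem.List.max? cats k1 := by
  cases cats with
  | nil => rfl
  | cons c cs =>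
      unfold PySem.List.max2? PySem.List.max?
      simp only [List.foldl_cons]
      obtain ⟨hc, hpw'⟩ := List.pairwise_cons.mp hpw
      exact pv_max2_through k1 k2 cs c hc hpw'

-- ---- association-list dict with fixed distinct keys = vector of values ----

theorem pv_getD_mkD (cats : List String) (vals : List Int) (hnd : cats.Nodup)
    (hlen : vals.length = cats.length) (i : Nat) (hi : i < cats.length) :
    (PySem.Dict.mk (cats.zip vals) : PySem.Dict String Int).getD (cats.getD i "") 0 = vals.getD i 0 := by
  induction cats generalizing vals i with
  | nil => simp at hi
  | cons c cs ih =>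
      cases vals with
      | nil => simp at hlen
      | cons w ws =>
          simp only [List.zip_cons_cons]
          cases i with
          | zero =>
              simp only [List.getD_cons_zero]
              simp [PySem.Dict.getD, PySem.Dict.get?_mk_cons]
          | succ i =>
              have hi' : i < cs.length := by simpa using hi
              have hne : ¬ (c = cs.getD i "") := by
                have hmem : cs.getD i "" ∈ cs := by
                  rw [List.getD_eq_getElem _ _ hi']
                  exact List.getElem_mem _
                have := (List.nodup_cons.mp hnd).1
                intro hcc
                exact this (hcc ▸ hmem)
              simp only [List.getD_cons_succ]
              rw [show (PySem.Dict.mk ((c, w) :: cs.zip ws) : PySem.Dict String Int).getD (cs.getD i "") 0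
                  = (PySem.Dict.mk (cs.zip ws) : PySem.Dict String Int).getD (cs.getD i "") 0 by
                unfold PySem.Dict.getD
                rw [PySem.Dict.get?_mk_cons, if_neg (by simpa using hne)]]
              exact ih ws (List.nodup_cons.mp hnd).2 (by simpa using hlen) i hi'

theorem pv_insert_mkD (cats : List String) (vals : List Int) (hnd : cats.Nodup)
    (hlen : vals.length = cats.length) (i : Nat) (hi : i < cats.length) (w : Int) :
    (PySem.Dict.mk (cats.zip vals) : PySem.Dict String Int).insert (cats.getD i "") w
      = PySem.Dict.mk (cats.zip (vals.set i w)) := by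
  have hilen : i < vals.length := by omega
  have hkeys : (PySem.Dict.mk (cats.zip vals) : PySem.Dict String Int).keys = cats := by
    simp only [PySem.Dict.keys]
    exact List.map_fst_zip (by omega)
  have hcont : (PySem.Dict.mk (cats.zip vals) : PySem.Dict String Int).contains (cats.getD i "") = true := by
    rw [PySem.Dict.contains_iff_mem_keys, hkeys, List.getD_eq_getElem _ _ hi]
    exact List.getElem_mem _
  unfold PySem.Dict.insert
  rw [if_pos hcont]
  congr 1
  apply List.ext_getElem
  · simp [hlen]
  · intro j h1 h2
    have hj : j < cats.length := by simp at h2; omega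
    have hjv : j < vals.length := by omega
    rw [List.getElem_map, List.getElem_zip, List.getElem_zip]
    have hgetD : cats.getD i "" = cats[i] := List.getD_eq_getElem _ _ hi
    simp only [hgetD]
    by_cases hij : j = i
    · subst hij
      rw [if_pos (by simp)]
      simp [List.getElem_set_self]
    · rw [if_neg (by
        simp only [beq_iff_eq]
        exact fun hcc => hij ((List.Nodup.getElem_inj_iff hnd).mp hcc))]
      simp [List.getElem_set_ne (by omega : i ≠ j)]

-- ---- part I: A's dict loop is the vector loop pvDecLoop ----

theorem pv_sub_sub (a v : List Int) (hlen : v.length = a.length) : pvSub a (pvSub a v) = v := by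
  unfold pvSub
  apply List.ext_getElem
  · simp [hlen]
  · intro j h1 h2
    simp only [List.getElem_zipWith]
    omega

theorem pv_zipWith_sub_set (a v : List Int) (i : Nat) (hi : i < v.length) (hlen : v.length = a.length) (w : Int) :
    List.zipWith (fun x y => x - y) a (v.set i w)
      = (List.zipWith (fun x y => x - y) a v).set i (a.getD i 0 - w) := by
  apply List.ext_getElem
  · simp
  · intro j h1 h2
    have hjv : j < v.length := by simp at h1; omega
    have hja : j < a.length := by omega
    rw [List.getElem_zipWith]
    simp only [List.getElem_set]
    split_ifs with hij
    · subst hij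
      rw [List.getD_eq_getElem _ _ hja]
    · rw [List.getElem_zipWith]

theorem pv_partI (available : PySem.Dict String Int) (cats : List String)
    (hnd : cats.Nodup)
    (hpw : cats.Pairwise (fun a b =>
      -(((PySem.List.index? pvOrder b).getD 0 : Nat) : Int) < -(((PySem.List.index? pvOrder a).getD 0 : Nat) : Int)))
    (r : Int) (v : List Int) (hlen : v.length = cats.length) :
    pvLoopA available cats (PySem.Dict.mk (cats.zip v)) r
      = PySem.Dict.mk (cats.zip (pvSub (cats.map (fun c => available.getD c 0))
          (pvDecLoop (pvSub (cats.map (fun c => available.getD c 0)) v) r))) := by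
  induction hn : r.toNat using Nat.strong_induction_on generalizing r v with
  | _ n ih =>
  have havlen : (cats.map (fun c => available.getD c 0)).length = cats.length := by simp
  have hglen : (pvSub (cats.map (fun c => available.getD c 0)) v).length = cats.length := by
    simp [pvSub, hlen]
  have havec : ∀ j, (hj : j < cats.length) →
      (cats.map (fun c => available.getD c 0)).getD j 0 = available.getD cats[j] 0 := by
    intro j hj
    rw [List.getD_eq_getElem _ _ (by simpa using hj), List.getElem_map]
  have hg : ∀ j, (hj : j < cats.length) →
      (pvSub (cats.map (fun c => available.getD c 0)) v).getD j 0
        = (cats.map (fun c => available.getD c 0)).getD j 0 - v.getD j 0 := by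
    intro j hj
    rw [List.getD_eq_getElem _ _ (by omega : j < (pvSub (cats.map (fun c => available.getD c 0)) v).length)]
    unfold pvSub
    rw [List.getElem_zipWith, List.getD_eq_getElem _ _ (by omega : j < (cats.map (fun c => available.getD c 0)).length),
      List.getD_eq_getElem _ _ (by omega : j < v.length)]
  by_cases hr : 0 < r
  · cases hf : pvFam (pvSub (cats.map (fun c => available.getD c 0)) v) with
    | none =>
        have hnil : pvSub (cats.map (fun c => available.getD c 0)) v = [] := (pv_fam_none _).mp hf
        have hcats : cats = [] := by
          have := congrArg List.length hnil
          simp [hglen] at this ⊢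
          omega
        subst hcats
        have hv : v = [] := List.length_eq_zero_iff.mp (by simpa using hlen)
        subst hv
        rw [pvLoopA, pvDecLoop]
        simp only [hf]
        simp only [pvSub, List.zip_nil_left]
        split <;> rfl
    | some p =>
        obtain ⟨i, gv⟩ := p
        obtain ⟨hilen, hval, hmaxg, hfirstg⟩ := pv_fam_spec _ i gv hf
        have hic : i < cats.length := by omega
        have hk1 : ∀ j, (hj : j < cats.length) →
            available.getD (cats.getD j "") 0 - (PySem.Dict.mk (cats.zip v) : PySem.Dict String Int).getD (cats.getD j "") 0
              = (pvSub (cats.map (fun c => available.getD c 0)) v).getD j 0 := by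
          intro j hj
          rw [pv_getD_mkD cats v hnd hlen j hj, hg j hj, havec j hj, List.getD_eq_getElem _ _ hj]
        have hmax2 : PySem.List.max2? cats
            (fun c => available.getD c 0 - (PySem.Dict.mk (cats.zip v) : PySem.Dict String Int).getD c 0)
            (fun c => -(((PySem.List.index? pvOrder c).getD 0 : Nat) : Int))
            = some (cats.getD i "") := by
          rw [pv_max2_eq_max? _ _ _ hpw]
          apply pv_max?_eq_of cats _ i "" hic
          · intro j hj
            rw [hk1 j hj, hk1 i hic]
            have := hmaxg j (by omega)
            omega
          · intro j hj
            rw [hk1 j (by omega), hk1 i hic]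
            have := hfirstg j hj
            omega
        rw [pvLoopA, pvDecLoop, if_pos hr, if_pos hr, hf, hmax2]
        dsimp only
        have hguard : (available.getD (cats.getD i "") 0 ≤ (PySem.Dict.mk (cats.zip v) : PySem.Dict String Int).getD (cats.getD i "") 0)
            ↔ gv ≤ 0 := by
          have := hk1 i hic
          rw [hval]
          omega
        by_cases hgv : gv ≤ 0
        · rw [if_pos (hguard.mpr hgv), if_pos hgv, pv_sub_sub _ _ (by omega)]
        · rw [if_neg (fun hc => hgv (hguard.mp hc)), if_neg hgv]
          rw [pv_getD_mkD cats v hnd hlen i hic,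
            pv_insert_mkD cats v hnd hlen i hic]
          have hset : pvSub (cats.map (fun c => available.getD c 0)) (v.set i (v.getD i 0 + 1))
              = (pvSub (cats.map (fun c => available.getD c 0)) v).set i (gv - 1) := by
            unfold pvSub
            rw [pv_zipWith_sub_set _ _ i (by omega) (by omega)]
            congr 1
            rw [hval, hg i hic]
            ring
          rw [← hset]
          exact ih (r - 1).toNat (by omega) (r - 1) _ (by simp [hlen]) rfl
  · rw [pvLoopA, pvDecLoop, if_neg hr, if_neg hr, pv_sub_sub _ _ (by omega)]

-- ---- part II: the vector loop is B's bulk water-filling ----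

theorem pv_rank_ne (g : List Int) (m : Int) {j j' : Nat} (hj : j < g.length) (hj' : j' < g.length)
    (h1 : g.getD j 0 = m) (h2 : g.getD j' 0 = m) (hne : j ≠ j') :
    pvRank g m j ≠ pvRank g m j' := by
  rcases lt_or_gt_of_ne hne with h | h
  · exact Nat.ne_of_lt (pv_rank_strict g m h hj h1)
  · exact (Nat.ne_of_lt (pv_rank_strict g m h hj' h2)).symm

theorem pv_unroll (g : List Int) (m m2 : Int) (k : Nat)
    (hk : k = g.countP (fun x => x == m))
    (hkpos : 0 < k)
    (hmax : ∀ j, j < g.length → g.getD j 0 ≤ m)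
    (hmpos : 0 < m) (hm2nn : 0 ≤ m2) (hm2lt : m2 < m)
    (hm2 : ∀ j, j < g.length → g.getD j 0 ≠ m → g.getD j 0 ≤ m2) :
    ∀ (n : Nat) (r : Int), (n : Int) ≤ r → (n : Int) ≤ (k : Int) * (m - m2) →
      pvDecLoop g r = pvDecLoop (pvAssign g m ((n / k : Nat) : Int) ((n % k : Nat) : Int) 0) (r - n) := by
  intro n
  induction n with
  | zero =>
      intro r _ _
      rw [Nat.zero_div, Nat.zero_mod]
      norm_num
      rw [pv_assign_id g m 0 le_rfl]
  | succ n ihn =>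
      intro r hnr hnc
      have hbr : (n : Int) ≤ r := by push_cast at hnr ⊢; omega
      have hbc : (n : Int) ≤ (k : Int) * (m - m2) := by push_cast at hnc ⊢; omega
      rw [ihn r hbr hbc]
      set q := n / k with hqdef
      set t := n % k with htdef
      have hdm : k * q + t = n := Nat.div_add_mod n k
      have htk : t < k := Nat.mod_lt _ hkpos
      have hq : (q : Int) < m - m2 := by
        have h1 : (k : Int) * q ≤ (n : Int) := by push_cast [← hdm]; omega
        have h2 : (n : Int) < (k : Int) * (m - m2) := by push_cast at hnc; omega
        have h3 : (k : Int) * q < (k : Int) * (m - m2) := lt_of_le_of_lt h1 h2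
        exact lt_of_mul_lt_mul_left h3 (by positivity)
      have hkcount : t < g.countP (fun x => x == m) := by omega
      obtain ⟨js, hjs_len, hjs_val, hjs_rank⟩ := pv_exists_rank g m t hkcount
      have hSlen : (pvAssign g m (q : Int) (t : Int) 0).length = g.length := pv_length_assign g m _ _ 0
      have hSval : ∀ j, j < g.length →
          (pvAssign g m (q : Int) (t : Int) 0).getD j 0 =
            if g.getD j 0 = m then m - q - (if (pvRank g m j : Int) < (t : Int) then 1 else 0)
            else g.getD j 0 := by
        intro j hj
        rw [pv_getD_assign g m _ _ 0 j hj]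
        norm_num
      have hjs_sval : (pvAssign g m (q : Int) (t : Int) 0).getD js 0 = m - q := by
        rw [hSval js hjs_len, if_pos hjs_val, hjs_rank]
        simp
      have hfamS : pvFam (pvAssign g m (q : Int) (t : Int) 0) = some (js, m - q) := by
        rw [← hjs_sval]
        apply pv_fam_eq_of _ js (by omega)
        · intro j hj
          rw [hjs_sval, hSval j (by omega)]
          by_cases hjm : g.getD j 0 = m
          · rw [if_pos hjm]; split_ifs <;> omega
          · rw [if_neg hjm]
            have := hm2 j (by omega) hjm
            omega
        · intro j hj
          rw [hjs_sval, hSval j (by omega)]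
          by_cases hjm : g.getD j 0 = m
          · rw [if_pos hjm]
            have hrk : pvRank g m j < t := by
              rw [← hjs_rank]
              exact pv_rank_strict g m hj (by omega) hjm
            rw [if_pos (by exact_mod_cast Int.ofNat_lt.mpr hrk)]
            omega
          · rw [if_neg hjm]
            have := hm2 j (by omega) hjm
            omega
      rw [pvDecLoop]
      rw [if_pos (by push_cast at hnr ⊢; omega : (0 : Int) < r - n), hfamS]
      dsimp only
      rw [if_neg (by omega : ¬ (m - (q : Int) ≤ 0))]
      have hstep : (pvAssign g m (q : Int) (t : Int) 0).set js (m - (q : Int) - 1)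
          = pvAssign g m (((n + 1) / k : Nat) : Int) (((n + 1) % k : Nat) : Int) 0 := by
        have hq' : (n + 1) / k = q + (t + 1) / k := by
          rw [← hdm]
          have : k * q + t + 1 = k * q + (t + 1) := by omega
          rw [this, Nat.mul_add_div hkpos]
        have ht' : (n + 1) % k = (t + 1) % k := by
          rw [← hdm]
          have : k * q + t + 1 = k * q + (t + 1) := by omega
          rw [this, Nat.mul_add_mod]
        apply List.ext_getElem
        · rw [List.length_set, hSlen, pv_length_assign]
        · intro j h1 h2
          have hjg : j < g.length := by rw [List.length_set, hSlen] at h1; exact h1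
          have hdivmod : ((((n + 1) / k : Nat)) : Int) = (q : Int) + (((t + 1) / k : Nat) : Int)
              ∧ ((((n + 1) % k : Nat)) : Int) = (((t + 1) % k : Nat) : Int) := by
            constructor
            · rw [hq']; push_cast; ring
            · rw [ht']
          rw [List.getElem_set]
          rw [← List.getD_eq_getElem _ 0 h2, ← List.getD_eq_getElem _ 0 (by rwa [hSlen] : j < (pvAssign g m (q : Int) (t : Int) 0).length)]
          rw [pv_getD_assign g m (((n + 1) / k : Nat) : Int) (((n + 1) % k : Nat) : Int) 0 j hjg, hSval j hjg]
          obtain ⟨hd1, hd2⟩ := hdivmod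
          rw [hd1, hd2]
          have hcases : (((((t + 1) / k : Nat)) : Int) = 0 ∧ ((((t + 1) % k : Nat)) : Int) = (t : Int) + 1
                ∧ (t : Int) + 1 < (k : Int))
              ∨ (((((t + 1) / k : Nat)) : Int) = 1 ∧ ((((t + 1) % k : Nat)) : Int) = 0
                ∧ (t : Int) + 1 = (k : Int)) := by
            by_cases hlast : t + 1 < k
            · left
              refine ⟨by rw [Nat.div_eq_of_lt hlast]; rfl,
                by rw [Nat.mod_eq_of_lt hlast]; push_cast; ring, by exact_mod_cast hlast⟩
            · have hteq : t + 1 = k := by omega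
              right
              refine ⟨by rw [hteq, Nat.div_self hkpos]; rfl,
                by rw [hteq, Nat.mod_self]; rfl, by exact_mod_cast hteq⟩
          by_cases hjj : js = j
          · subst hjj
            rw [if_pos rfl, if_pos hjs_val, hjs_rank]
            rcases hcases with ⟨e1, e2, e3⟩ | ⟨e1, e2, e3⟩ <;> rw [e1, e2] <;> split_ifs <;> omega
          · rw [if_neg hjj]
            by_cases hjm : g.getD j 0 = m
            · rw [if_pos hjm, if_pos hjm]
              have hrkne : pvRank g m j ≠ t := by
                rw [← hjs_rank]
                exact pv_rank_ne g m hjg hjs_len hjm hjs_val (fun hh => hjj hh.symm)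
              have hrklt : pvRank g m j < k := by
                have := pv_rank_lt_count g m j hjg hjm
                omega
              have hcast1 : ((pvRank g m j : Nat) : Int) ≠ (t : Int) := by exact_mod_cast hrkne
              have hcast2 : ((pvRank g m j : Nat) : Int) < (k : Int) := by exact_mod_cast hrklt
              have hcast3 : (t : Int) + 1 ≤ (k : Int) := by exact_mod_cast htk
              rcases hcases with ⟨e1, e2, e3⟩ | ⟨e1, e2, e3⟩ <;> rw [e1, e2] <;> split_ifs <;> omega
            · rw [if_neg hjm, if_neg hjm]
      rw [hstep]
      congr 1
      push_cast
      ring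

theorem pv_fold_assign (g : List Int) (m q t : Int) (acc : List Int) (s : Int) :
    (g.foldl (fun (acc : List Int × Int) h =>
        if h = m then (acc.1 ++ [m - q - (if acc.2 < t then 1 else 0)], acc.2 + 1)
        else (acc.1 ++ [h], acc.2)) (acc, s)).1 = acc ++ pvAssign g m q t s := by
  induction g generalizing acc s with
  | nil => simp [pvAssign]
  | cons h gs ih =>
      unfold pvAssign
      simp only [List.foldl_cons]
      split
      · rw [ih]
        simp
      · rw [ih]
        simp

theorem pv_decLoop_nil (r : Int) : pvDecLoop [] r = [] := by
  rw [pvDecLoop]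
  split
  · rfl
  · rfl

theorem pv_partII (g : List Int) (r : Int) (hnn : ∀ x ∈ g, 0 ≤ x) :
    pvDecLoop g r = pvWater g r := by
  induction hmu : (g.foldl max 0).toNat using Nat.strong_induction_on generalizing g r with
  | _ mu ih =>
  rw [pvWater]
  cases hm : PySem.List.max? g (fun x => x) with
  | none =>
      have hnil : g = [] := (PySem.List.max?_eq_none_iff _ _).mp hm
      subst hnil
      exact pv_decLoop_nil r
  | some m =>
      have hmem : m ∈ g := PySem.List.max?_mem hm
      have hmax : ∀ y ∈ g, y ≤ m := fun y hy => PySem.List.max?_isMax hm y hy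
      have hmaxD : ∀ j, j < g.length → g.getD j 0 ≤ m := by
        intro j hj
        rw [List.getD_eq_getElem _ _ hj]
        exact hmax _ (List.getElem_mem _)
      dsimp only
      by_cases hguard : r ≤ 0 ∨ m ≤ 0
      · rw [if_pos hguard]
        rw [pvDecLoop]
        by_cases hr : 0 < r
        · rw [if_pos hr]
          have hm0 : m ≤ 0 := by rcases hguard with h | h; omega; exact h
          cases hf : pvFam g with
          | none => rfl
          | some p =>
              obtain ⟨i, v⟩ := p
              obtain ⟨hil, hvl, _, _⟩ := pv_fam_spec g i v hf
              dsimp only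
              rw [if_pos (by rw [hvl]; exact le_trans (hmaxD i hil) hm0)]
        · rw [if_neg hr]
      · rw [if_neg hguard]
        have hrpos : 0 < r := by omega
        have hmpos : 0 < m := by omega
        set m2 := PySem.List.maxD (List.filter (fun h => decide (h < m)) g) (fun x => x) 0 with hm2def
        have hm2nn : 0 ≤ m2 := by
          rw [hm2def]
          unfold PySem.List.maxD
          cases hx : PySem.List.max? (List.filter (fun h => decide (h < m)) g) (fun x => x) with
          | none => simp
          | some w =>
              have hw := PySem.List.max?_mem hx
              simp only [List.mem_filter] at hw
              simpa using hnn w hw.1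
        have hm2lt : m2 < m := by
          rw [hm2def]
          unfold PySem.List.maxD
          cases hx : PySem.List.max? (List.filter (fun h => decide (h < m)) g) (fun x => x) with
          | none => simpa using hmpos
          | some w =>
              have hw := PySem.List.max?_mem hx
              simp only [List.mem_filter, decide_eq_true_eq] at hw
              simpa using hw.2
        have hm2b : ∀ x ∈ g, x ≠ m → x ≤ m2 := by
          intro x hx hne
          have hxlt : x < m := lt_of_le_of_ne (hmax x hx) hne
          rw [hm2def]
          unfold PySem.List.maxD
          cases hx2 : PySem.List.max? (List.filter (fun h => decide (h < m)) g) (fun x => x) with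
          | none =>
              exfalso
              have := (PySem.List.max?_eq_none_iff _ _).mp hx2
              rw [List.filter_eq_nil_iff] at this
              exact absurd (by simpa using hxlt) (by simpa using this x hx)
          | some w =>
              have := PySem.List.max?_isMax hx2 x (by simp [List.mem_filter, hx, hxlt])
              simpa using this
        have hm2bD : ∀ j, j < g.length → g.getD j 0 ≠ m → g.getD j 0 ≤ m2 := by
          intro j hj hne
          rw [List.getD_eq_getElem _ _ hj] at hne ⊢
          exact hm2b _ (List.getElem_mem _) hne
        set k := PySem.List.count g m with hkdef
        have hkcount : k = List.countP (fun x => x == m) g := by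
          rw [hkdef]; simp [PySem.List.count, List.count]
        have hkpos : 0 < k := by
          rw [hkdef]
          simpa [PySem.List.count] using List.count_pos_iff.mpr hmem
        have hm2m : 0 < m - m2 := by omega
        by_cases hch : (k : Int) * (m - m2) ≤ r
        · rw [if_pos hch]
          have hcast : ((k * (m - m2).toNat : Nat) : Int) = (k : Int) * (m - m2) := by
            push_cast [Int.toNat_of_nonneg (le_of_lt hm2m)]
            ring
          rw [pv_unroll g m m2 k hkcount hkpos hmaxD hmpos hm2nn hm2lt hm2bD
            (k * (m - m2).toNat) r (by rw [hcast]; exact hch) (by rw [hcast])]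
          have e1 : (k * (m - m2).toNat) / k = (m - m2).toNat := Nat.mul_div_cancel_left _ hkpos
          have e2 : (k * (m - m2).toNat) % k = 0 := Nat.mul_mod_right k _
          rw [e1, e2]
          have e3 : (((m - m2).toNat : Nat) : Int) = m - m2 := Int.toNat_of_nonneg (by omega)
          rw [e3]
          simp only [Nat.cast_zero]
          rw [pv_assign_cap g m m2 0 le_rfl
            (fun x hx => by
              by_cases hxm : x = m
              · exact Or.inl hxm
              · exact Or.inr (hm2b x hx hxm)) hm2lt.le]
          rw [hcast]
          apply ih ((List.map (fun h => min h m2) g).foldl max 0).toNat _ _ _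
            (fun x hx => by
              simp only [List.mem_map] at hx
              obtain ⟨y, hy, rfl⟩ := hx
              exact le_min (hnn y hy) hm2nn) rfl
          have hb1 : (List.map (fun h => min h m2) g).foldl max 0 ≤ max 0 m2 := by
            apply pv_foldl_max_le
            · exact le_max_left _ _
            · intro x hx
              simp only [List.mem_map] at hx
              obtain ⟨y, _, rfl⟩ := hx
              exact le_trans (min_le_right _ _) (le_max_right _ _)
          have hb2 : m ≤ g.foldl max 0 := (PySem.List.le_foldl_max g 0).2 m hmem
          omega
        · rw [if_neg hch]
          have hrn : ((r.toNat : Nat) : Int) = r := Int.toNat_of_nonneg (le_of_lt hrpos)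
          rw [pv_unroll g m m2 k hkcount hkpos hmaxD hmpos hm2nn hm2lt hm2bD
            r.toNat r (by rw [hrn]) (by rw [hrn]; omega)]
          rw [hrn, sub_self, pvDecLoop, if_neg (by omega : ¬ (0:Int) < 0)]
          have hfd : PySem.Int.floordiv r ((k : Nat) : Int) = ((r.toNat / k : Nat) : Int) := by
            rw [← hrn]
            exact_mod_cast PySem.Int.floordiv_natCast r.toNat k
          have hmd : PySem.Int.mod r ((k : Nat) : Int) = ((r.toNat % k : Nat) : Int) := by
            rw [← hrn]
            exact_mod_cast PySem.Int.mod_natCast r.toNat k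
          rw [hfd, hmd, pv_fold_assign g m _ _ [] 0]
          rw [List.nil_append]

-- ---- assembling the main theorem ----

theorem pv_map_pair_eq_zip {α β : Type} (l : List α) (f : α → β) :
    l.map (fun c => (c, f c)) = l.zip (l.map f) := by
  induction l with
  | nil => rfl
  | cons c cs ih => simp [ih]

theorem pv_zip_map_sub (l : List String) (v : List Int) (f : String → Int) :
    (l.zip v).map (fun p => f p.1 - p.2) = List.zipWith (fun x y => x - y) (l.map f) v := by
  apply List.ext_getElem
  · simp
  · intro j h1 h2
    simp only [List.getElem_map, List.getElem_zip, List.getElem_zipWith]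

theorem pv_zip_map_pair_sub (l : List String) (v : List Int) (f : String → Int) :
    (l.zip v).map (fun p => (p.1, f p.1 - p.2)) = l.zip (List.zipWith (fun x y => x - y) (l.map f) v) := by
  apply List.ext_getElem
  · simp
  · intro j h1 h2
    simp only [List.getElem_map, List.getElem_zip, List.getElem_zipWith]

theorem pv_length_decLoop (g : List Int) (r : Int) : (pvDecLoop g r).length = g.length := by
  induction hn : r.toNat using Nat.strong_induction_on generalizing g r with
  | _ n ih =>
  rw [pvDecLoop]
  by_cases hr : 0 < r
  · rw [if_pos hr]
    cases hf : pvFam g with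
    | none => rfl
    | some p =>
        obtain ⟨i, v⟩ := p
        dsimp only
        by_cases hv : v ≤ 0
        · rw [if_pos hv]
        · rw [if_neg hv]
          rw [ih (r - 1).toNat (by omega) _ (r - 1) rfl]
          simp
  · rw [if_neg hr]

theorem pv_sum_le (l : List Int) (base : Int) (h : ∀ x ∈ l, x ≤ base) :
    l.sum ≤ (l.length : Int) * base := by
  induction l with
  | nil => simp
  | cons x xs ih =>
      simp only [List.sum_cons, List.length_cons]
      have h1 : x ≤ base := h x (by simp)
      have h2 : xs.sum ≤ (xs.length : Int) * base := ih (fun y hy => h y (by simp [hy]))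
      push_cast
      nlinarith

theorem pv_core (available : PySem.Dict String Int) (cats : List String) (t : Int)
    (hnd : cats.Nodup)
    (hpw : cats.Pairwise (fun a b =>
      -(((PySem.List.index? pvOrder b).getD 0 : Nat) : Int) < -(((PySem.List.index? pvOrder a).getD 0 : Nat) : Int)))
    (hne : cats ≠ []) (ht : 0 < t) :
    (pvLoopA available cats
        (cats.foldl (fun d c => d.insert c (min (available.getD c 0) (PySem.Int.floordiv t (cats.length : Int)))) PySem.Dict.empty)
        (max (t - (cats.foldl (fun d c => d.insert c (min (available.getD c 0) (PySem.Int.floordiv t (cats.length : Int)))) PySem.Dict.empty).values.sum) 0)).items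
      = (List.foldl (fun d p => d.insert p.1 (available.getD p.1 0 - p.2)) PySem.Dict.empty (cats.zip (pvWater (((cats.zip (cats.map (fun c => min (available.getD c 0) (PySem.Int.floordiv t (cats.length : Int))))).map (fun p => available.getD p.1 0 - p.2))) (t - (cats.map (fun c => min (available.getD c 0) (PySem.Int.floordiv t (cats.length : Int)))).sum)))).items := by
  set base := PySem.Int.floordiv t (cats.length : Int) with hbase
  set v0 := cats.map (fun c => min (available.getD c 0) base) with hv0
  have hlenpos : 0 < cats.length := List.length_pos_iff.mpr hne
  have hbase_nn : 0 ≤ base := by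
    rw [hbase, PySem.Int.floordiv_eq_ediv_of_pos (by exact_mod_cast hlenpos)]
    exact Int.ediv_nonneg (le_of_lt ht) (by positivity)
  have hbaselen : (cats.length : Int) * base ≤ t := by
    have h1 := PySem.Int.floordiv_mul_add_mod t (cats.length : Int)
    have h2 := PySem.Int.mod_nonneg t (by exact_mod_cast hlenpos : (0:Int) < (cats.length : Int))
    rw [← hbase] at h1
    nlinarith
  have hv0len : v0.length = cats.length := by simp [hv0]
  have hsum : v0.sum ≤ t := by
    have h1 : ∀ x ∈ v0, x ≤ base := by
      intro x hx
      rw [hv0] at hx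
      simp only [List.mem_map] at hx
      obtain ⟨c, _, rfl⟩ := hx
      exact min_le_right _ _
    have := pv_sum_le v0 base h1
    rw [hv0len] at this
    omega
  -- A's initial dict is the zip of cats with v0
  have h1 := PySem.Dict.items_foldl_insert_fresh cats (fun c => c)
    (fun c => min (available.getD c 0) base) PySem.Dict.empty
    (fun a _ => by simp [PySem.Dict.contains_empty]) (by simpa using hnd)
  have hfold : (cats.foldl (fun d c => d.insert c (min (available.getD c 0) base)) PySem.Dict.empty)
      = PySem.Dict.mk (cats.zip v0) := by
    apply PySem.Dict.ext
    refine h1.trans ?_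
    rw [hv0, pv_map_pair_eq_zip]
    rfl
  rw [hfold]
  have hvals : (PySem.Dict.mk (cats.zip v0) : PySem.Dict String Int).values = v0 := by
    simp only [PySem.Dict.values]
    exact List.map_snd_zip (by omega)
  rw [hvals]
  have hrem : max (t - v0.sum) 0 = t - v0.sum := max_eq_left (by omega)
  rw [hrem]
  rw [pv_partI available cats hnd hpw (t - v0.sum) v0 hv0len]
  -- B's head is the headroom vector
  rw [pv_zip_map_sub cats v0 (fun c => available.getD c 0)]
  have hg0nn : ∀ x ∈ List.zipWith (fun x y => x - y) (cats.map (fun c => available.getD c 0)) v0, 0 ≤ x := by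
    intro x hx
    obtain ⟨j, hj, rfl⟩ := List.mem_iff_getElem.mp hx
    have hjc : j < cats.length := by
      rw [List.length_zipWith, List.length_map, hv0len] at hj
      omega
    rw [List.getElem_zipWith]
    have hv0j : v0[j]'(by omega) = min (available.getD (cats[j]'hjc) 0) base := by
      simp [hv0]
    have hmapj : (cats.map (fun c => available.getD c 0))[j]'(by simpa using hjc)
        = available.getD (cats[j]'hjc) 0 := List.getElem_map ..
    rw [hmapj, hv0j]
    omega
  rw [← pv_partII _ (t - v0.sum) hg0nn]
  set FH := pvDecLoop (List.zipWith (fun x y => x - y) (cats.map (fun c => available.getD c 0)) v0) (t - v0.sum) with hFH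
  have hFHlen : FH.length = cats.length := by
    rw [hFH, pv_length_decLoop]
    simp [hv0len]
  have h2 := PySem.Dict.items_foldl_insert_fresh (cats.zip FH) (fun p => p.1)
    (fun p => available.getD p.1 0 - p.2) PySem.Dict.empty
    (fun a _ => by simp [PySem.Dict.contains_empty])
    (by rw [List.map_fst_zip (by omega)]; exact hnd)
  refine Eq.trans ?_ h2.symm
  rw [pv_zip_map_pair_sub cats FH (fun c => available.getD c 0)]
  rfl

theorem desired_eq (target_total : Int) (rows : List (List (String × String))) :
    desired_source_category_counts target_total rows = desired_source_category_counts_alt target_total rows := by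
  unfold desired_source_category_counts desired_source_category_counts_alt
  dsimp only
  rw [show (rows.foldl (fun d row =>
        d.insert (PySem.Dict.getD (⟨row⟩ : PySem.Dict String String) "source_category" "")
          (d.getD (PySem.Dict.getD (⟨row⟩ : PySem.Dict String String) "source_category" "") 0 + 1)) PySem.Dict.empty)
      = PySem.Dict.counter (rows.map (fun row => PySem.Dict.getD (⟨row⟩ : PySem.Dict String String) "source_category" "")) by
    rw [← PySem.Dict.foldl_insert_getD_add_one_eq_counter, List.foldl_map]]
  by_cases hguard : pvOrder.filter (fun c =>
      0 < (PySem.Dict.counter (rows.map (fun row => PySem.Dict.getD (⟨row⟩ : PySem.Dict String String) "source_category" ""))).getD c 0) = []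
      ∨ target_total ≤ 0
  · rw [if_pos hguard, if_pos hguard]
  · rw [if_neg hguard, if_neg hguard]
    have hnd : (pvOrder.filter (fun c =>
        0 < (PySem.Dict.counter (rows.map (fun row => PySem.Dict.getD (⟨row⟩ : PySem.Dict String String) "source_category" ""))).getD c 0)).Nodup :=
      List.Nodup.filter _ (by decide)
    have hpw := List.Pairwise.filter (R := fun a b =>
        -(((PySem.List.index? pvOrder b).getD 0 : Nat) : Int) < -(((PySem.List.index? pvOrder a).getD 0 : Nat) : Int))
      (fun c => decide (0 < (PySem.Dict.counter (rows.map (fun row => PySem.Dict.getD (⟨row⟩ : PySem.Dict String String) "source_category" ""))).getD c 0))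
      (l := pvOrder) (by decide)
    exact pv_core _ _ target_total hnd hpw
      (by intro hc; exact hguard (Or.inl hc)) (by omega)

-- ===== VERDICT (by name: the statement is the Claim_ definition above) =====
theorem desired_source_category_counts_spec : Claim_equal_desired_source_category_counts := by
  intro t rows _
  unfold Spec_desired_source_category_counts
  exact desired_eq t rows
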